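-- pv_equiv track=rewrite | github.com/damiskov/02443-stochastic-simulation | project 1/task13_patrickFinal.py | update_diagonal_elems
-- ===== SOURCE A (Python) =====
-- def update_diagonal_elems(Q):
--     sum = 0
--     for i in range (len(Q)):
--         for j in range (len(Q)):
--
--             # set last row all zeros
--             if i == len(Q) - 1:
--                 Q[i][j] = 0
--
--             # set Q as lower triangular matrix
--             if i > j:
--                 Q[i][j] = 0
--
--     for i in range(len(Q)):
--         for j in range (len(Q)):
--             sum = 0
--             if i == j:
--                     for k in range(i + 1, len(Q)):
--                         sum += Q[i][k]
--                     Q[i][i] = -sum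
--
--
--
--
--     return Q
-- ===== SOURCE B (Python) =====
-- def update_diagonal_elems(Q):
--     n = len(Q)
--     for i, row in enumerate(Q):
--         if i == n - 1:
--             # last row: all zeros
--             for j in range(n):
--                 row[j] = 0
--         else:
--             # diagonal from the still-untouched upper triangle, then zero the strict lower part
--             diag = -sum(row[i + 1:n])
--             for j in range(i):
--                 row[j] = 0
--             row[i] = diag
--     return Q
-- ===== Notes on version B (the rewrite author's own statement) =====
-- stated objective: faster
-- what changed: One row-by-row pass that zeroes and sets the diagonal together (diagonal computed from the untouched upper-triangle slice with sum) replaces A's two full n x n double-loop passes plus an inner diagonal-sum loop.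
import Mathlib
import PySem

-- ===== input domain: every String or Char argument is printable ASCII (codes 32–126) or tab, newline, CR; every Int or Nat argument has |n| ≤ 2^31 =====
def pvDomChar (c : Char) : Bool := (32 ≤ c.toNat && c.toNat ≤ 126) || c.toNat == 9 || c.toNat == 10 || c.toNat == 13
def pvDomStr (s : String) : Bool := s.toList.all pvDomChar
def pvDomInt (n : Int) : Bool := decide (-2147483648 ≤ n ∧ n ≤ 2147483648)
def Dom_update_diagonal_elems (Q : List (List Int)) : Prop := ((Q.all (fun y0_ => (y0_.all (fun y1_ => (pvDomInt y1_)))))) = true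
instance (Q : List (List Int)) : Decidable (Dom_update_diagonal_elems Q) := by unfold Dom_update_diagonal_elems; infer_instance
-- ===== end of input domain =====

-- B replaces A's two full n×n double-loop passes (zeroing, then a diagonal pass with an inner
-- sum loop) by one row-by-row pass that zeroes and sets the diagonal together.  Both Pythons
-- mutate Q in place and return the same object; the equivalence proved here is about the
-- returned value (B performs the same in-place mutation).

-- ===== PORT A =====
-- Q[i][j] = v  (both indices are Nat loop counters; in-range under Pre_, where List.set/getD are exact)
def pvSetE (Q : List (List Int)) (i j : Nat) (v : Int) : List (List Int) :=
  Q.set i ((Q.getD i []).set j v)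

def update_diagonal_elems (Q : List (List Int)) : List (List Int) :=
  let n := Q.length
  -- first double loop: zero the last row and the strict lower triangle
  let Q1 := (List.range n).foldl (fun Q i =>
    (List.range n).foldl (fun Q j =>
      let Q := if i = n - 1 then pvSetE Q i j 0 else Q
      if j < i then pvSetE Q i j 0 else Q) Q) Q
  -- second double loop: on the diagonal, sum Q[i][i+1:] by an inner k-loop and set Q[i][i] = -sum
  (List.range n).foldl (fun Q i =>
    (List.range n).foldl (fun Q j =>
      if i = j then
        let s := ((List.range (n - (i + 1))).map (· + (i + 1))).foldl
          (fun s k => s + (Q.getD i []).getD k 0) 0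
        pvSetE Q i i (-s)
      else Q) Q) Q1

-- ===== PORT B =====
def pvAltRow (n i : Nat) (row : List Int) : List Int :=
  if i = n - 1 then
    (List.range n).foldl (fun r j => r.set j 0) row
  else
    let diag := -(PySem.List.slice row (some ((i : Int) + 1)) (some (n : Int))).sum
    ((List.range i).foldl (fun r j => r.set j 0) row).set i diag

def update_diagonal_elems_alt (Q : List (List Int)) : List (List Int) :=
  Q.mapIdx (fun i row => pvAltRow Q.length i row)

-- ===== PRECONDITION & SPEC =====
-- Pre_ excludes ragged matrices with a row shorter than len(Q): Python A raises IndexError there.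
def Pre_update_diagonal_elems (Q : List (List Int)) : Prop := ∀ row ∈ Q, Q.length ≤ row.length
instance (Q : List (List Int)) : Decidable (Pre_update_diagonal_elems Q) := by unfold Pre_update_diagonal_elems; infer_instance
def pvWitness_update_diagonal_elems : List (List Int) := [[1, 2, 3], [4, 5, 6], [7, 8, 9]]

def Spec_update_diagonal_elems (Q : List (List Int)) (out : List (List Int)) : Prop := out = update_diagonal_elems_alt Q
instance (Q : List (List Int)) (out : List (List Int)) : Decidable (Spec_update_diagonal_elems Q out) := by unfold Spec_update_diagonal_elems; infer_instance

-- ===== CLAIM (what is proved, stated in full; the proofs are below) =====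
def Claim_equal_update_diagonal_elems : Prop := ∀ (Q : List (List Int)), Dom_update_diagonal_elems Q → Pre_update_diagonal_elems Q → Spec_update_diagonal_elems Q (update_diagonal_elems Q)

-- ===== LEMMAS AND PROOFS =====

-- the row-transformer hidden in A's first double loop, for a fixed row index i
def rowStep1 (n i : Nat) (r : List Int) (j : Nat) : List Int :=
  let r := if i = n - 1 then r.set j 0 else r
  if j < i then r.set j 0 else r

-- the row-transformer hidden in A's second double loop
def rowDiag (n i : Nat) (r : List Int) : List Int :=
  r.set i (-(((List.range (n - (i + 1))).map (· + (i + 1))).foldl (fun s k => s + r.getD k 0) 0))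

lemma body1_eq (n i : Nat) (Q : List (List Int)) (j : Nat) :
    (let Q' := if i = n - 1 then pvSetE Q i j 0 else Q
     if j < i then pvSetE Q' i j 0 else Q') = Q.set i (rowStep1 n i (Q.getD i []) j) := by
  by_cases hlen : i < Q.length
  · simp only [pvSetE, rowStep1]
    split_ifs <;>
      simp [List.getD_eq_getElem?_getD, List.getElem?_set_self hlen, List.set_set,
        List.getElem?_eq_getElem hlen, List.set_getElem_self]
  · have h2 : Q.length ≤ i := by omega
    simp [pvSetE, rowStep1, List.set_eq_of_length_le h2]

lemma foldl_set_row {α : Type} (i : Nat) (f : List Int → α → List Int) (xs : List α)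
    (Q : List (List Int)) :
    xs.foldl (fun Q a => Q.set i (f (Q.getD i []) a)) Q = Q.set i (xs.foldl f (Q.getD i [])) := by
  induction xs generalizing Q with
  | nil =>
    by_cases hlen : i < Q.length
    · simp [List.getD_eq_getElem?_getD, List.set_getElem_self,
        (List.getElem?_eq_getElem hlen)]
    · simp [List.set_eq_of_length_le (by omega : Q.length ≤ i)]
  | cons x xs ih =>
    simp only [List.foldl_cons]
    rw [ih]
    by_cases hlen : i < Q.length
    · simp [List.getD_eq_getElem?_getD, List.getElem?_set_self hlen, List.set_set]
    · simp [List.set_eq_of_length_le (by omega : Q.length ≤ i)]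

lemma mapIdx_zero_set (m : Nat) (r : List Int) :
    ((r.mapIdx (fun k x => if k < m then 0 else x)).set m 0)
      = r.mapIdx (fun k x => if k < m + 1 then 0 else x) := by
  apply List.ext_getElem?
  intro k
  by_cases hkm : k = m
  · subst hkm
    by_cases hk : k < r.length
    · simp [List.getElem?_set, List.getElem?_mapIdx, List.length_mapIdx, hk,
        List.getElem?_eq_getElem hk]
    · simp [List.getElem?_set, List.getElem?_mapIdx, List.length_mapIdx, hk]
  · simp only [List.getElem?_set, List.getElem?_mapIdx, List.length_mapIdx,
      if_neg (Ne.symm hkm)]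
    cases hr : r[k]? <;> simp [show (k < m + 1) ↔ k < m by omega]

lemma zeroFold_eq (m : Nat) (r : List Int) :
    (List.range m).foldl (fun r j => r.set j 0) r
      = r.mapIdx (fun k x => if k < m then 0 else x) := by
  induction m with
  | zero =>
    apply List.ext_getElem?
    simp [List.getElem?_mapIdx]
  | succ m ih =>
    rw [List.range_succ, List.foldl_append, ih]
    simpa using mapIdx_zero_set m r

lemma guardFold_eq (n i : Nat) (r : List Int) :
    (List.range n).foldl (fun r j => if j < i then r.set j 0 else r) r
      = r.mapIdx (fun k x => if k < min i n then 0 else x) := by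
  induction n with
  | zero =>
    apply List.ext_getElem?
    simp [List.getElem?_mapIdx]
  | succ n ih =>
    rw [List.range_succ, List.foldl_append, ih]
    by_cases hn : n < i
    · have h1 : min i n = n := by omega
      have h2 : min i (n + 1) = n + 1 := by omega
      simpa [hn, h1, h2] using mapIdx_zero_set n r
    · have h1 : min i n = min i (n + 1) := by omega
      simp [hn, h1]

lemma foldl_range_ite_id (n i : Nat) (h : List (List Int) → List (List Int))
    (Q : List (List Int)) (hi : n ≤ i) :
    (List.range n).foldl (fun Q j => if i = j then h Q else Q) Q = Q := by
  induction n generalizing Q with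
  | zero => simp
  | succ n ih =>
    rw [List.range_succ, List.foldl_append]
    have hne : i ≠ n := by omega
    simp [ih _ (by omega), hne]

lemma foldl_range_ite_eq (n i : Nat) (hi : i < n) (h : List (List Int) → List (List Int))
    (Q : List (List Int)) :
    (List.range n).foldl (fun Q j => if i = j then h Q else Q) Q = h Q := by
  obtain ⟨m, rfl⟩ : ∃ m, n = (i + 1) + m := ⟨n - (i + 1), by omega⟩
  rw [List.range_add, List.foldl_append, List.range_succ, List.foldl_append,
    foldl_range_ite_id i i h Q (le_refl i)]
  simp only [List.foldl_cons, List.foldl_nil, if_pos rfl]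
  have hcong : ((List.range m).map (fun x => (i + 1) + x)).foldl
        (fun Q j => if i = j then h Q else Q) (h Q)
      = ((List.range m).map (fun x => (i + 1) + x)).foldl (fun Q _ => Q) (h Q) :=
    PySem.List.foldl_congr_mem _ _ _ _ (by
      intro acc x hx
      simp only [List.mem_map, List.mem_range] at hx
      obtain ⟨t, ht, rfl⟩ := hx
      simp [show i ≠ i + 1 + t by omega])
  simpa using hcong.trans (List.foldl_fixed _)

lemma foldl_range_set_mapIdx (g : Nat → List Int → List Int) (n : Nat) (Q : List (List Int)) :
    (List.range n).foldl (fun Q i => Q.set i (g i (Q.getD i []))) Q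
      = Q.mapIdx (fun i r => if i < n then g i r else r) := by
  induction n with
  | zero =>
    apply List.ext_getElem?
    simp [List.getElem?_mapIdx]
  | succ n ih =>
    rw [List.range_succ, List.foldl_append, ih]
    simp only [List.foldl_cons, List.foldl_nil]
    have hMD : (Q.mapIdx (fun i r => if i < n then g i r else r)).getD n [] = Q.getD n [] := by
      by_cases hn : n < Q.length
      · simp [List.getD_eq_getElem?_getD, List.getElem?_mapIdx, List.getElem?_eq_getElem hn]
      · simp [List.getD_eq_getElem?_getD, List.getElem?_mapIdx,
          List.getElem?_eq_none (by omega : Q.length ≤ n)]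
    rw [hMD]
    apply List.ext_getElem?
    intro k
    by_cases hkn : k = n
    · subst hkn
      by_cases hk : k < Q.length
      · simp [List.getElem?_set_self (by simpa using hk), List.getElem?_mapIdx,
          List.getElem?_eq_getElem hk, List.getD_eq_getElem?_getD, hk]
      · simp [List.getElem?_set, List.getElem?_mapIdx, List.length_mapIdx, hk,
          List.getElem?_eq_none (by omega : Q.length ≤ k)]
    · rw [List.getElem?_set_ne (Ne.symm hkn)]
      simp only [List.getElem?_mapIdx]
      cases hr : Q[k]? <;> simp [show (k < n + 1) ↔ k < n by omega]

-- per-row equality: A's two row-transformers composed give B's single row-transformer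
lemma row_eq (n i : Nat) (row : List Int) (hi : i < n) (hlen : n ≤ row.length) :
    rowDiag n i ((List.range n).foldl (rowStep1 n i) row) = pvAltRow n i row := by
  by_cases hin : i = n - 1
  · -- last row: every step of rowStep1 is plain `set j 0`
    have hstep : rowStep1 n i = fun r j => r.set j 0 := by
      funext r j
      simp only [rowStep1, hin, if_pos rfl]
      split_ifs <;> simp [List.set_set]
    rw [hstep, zeroFold_eq]
    have hrange : n - (i + 1) = 0 := by omega
    have hset : ((row.mapIdx (fun k x => if k < n then 0 else x)).set i (-0 : Int))
        = row.mapIdx (fun k x => if k < n then 0 else x) := by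
      apply List.ext_getElem?
      intro k
      by_cases hki : k = i
      · subst hki
        have hk : k < row.length := by omega
        rw [List.getElem?_set_self (by simp [List.length_mapIdx]; omega)]
        simp [List.getElem?_mapIdx, List.getElem?_eq_getElem hk, show k < n from hi]
      · rw [List.getElem?_set_ne (Ne.symm hki)]
    simp only [rowDiag, hrange, List.range_zero, List.map_nil, List.foldl_nil]
    rw [hset, pvAltRow, if_pos hin, zeroFold_eq]
  · -- interior row: rowStep1 only zeroes j < i
    have hstep : rowStep1 n i = fun r j => if j < i then r.set j 0 else r := by
      funext r j
      simp [rowStep1, hin]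
    rw [hstep, guardFold_eq]
    have hmin : min i n = i := by omega
    rw [hmin]
    -- the zeroed prefix does not touch the indices k ≥ i + 1 read by the sum
    have hgd : ∀ k, i + 1 ≤ k → k < n →
        (row.mapIdx (fun k x => if k < i then 0 else x)).getD k 0 = row.getD k 0 := by
      intro k h1 h2
      have hk : k < row.length := by omega
      simp [List.getD_eq_getElem?_getD, List.getElem?_mapIdx, List.getElem?_eq_getElem hk]
      omega
    have hsum : ((List.range (n - (i + 1))).map (· + (i + 1))).foldl
          (fun s k => s + (row.mapIdx (fun k x => if k < i then 0 else x)).getD k 0) 0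
        = ((List.range (n - (i + 1))).map (· + (i + 1))).foldl
          (fun s k => s + row.getD k 0) 0 := by
      apply PySem.List.foldl_congr_mem
      intro acc k hk
      simp only [List.mem_map, List.mem_range] at hk
      obtain ⟨t, ht, rfl⟩ := hk
      rw [hgd (t + (i + 1)) (by omega) (by omega)]
    have hsum2 : ((List.range (n - (i + 1))).map (· + (i + 1))).foldl
          (fun s k => s + row.getD k 0) 0 = ((row.drop (i + 1)).take (n - (i + 1))).sum := by
      generalize hm : n - (i + 1) = m
      have hbound : i + 1 + m ≤ row.length := by omega
      clear hm hgd hsum hin hi hmin hlen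
      induction m with
      | zero => simp
      | succ m ih =>
        rw [List.range_succ, List.map_append, List.foldl_append, ih (by omega)]
        have hidx : i + 1 + m < row.length := by omega
        have htake : (row.drop (i + 1)).take (m + 1)
            = (row.drop (i + 1)).take m ++ [(row.drop (i + 1))[m]'(by simp; omega)] := by
          rw [List.take_succ]
          simp [List.getElem?_eq_getElem (by simp; omega : m < (row.drop (i + 1)).length)]
        rw [htake]
        have hcomm : m + (i + 1) = i + 1 + m := by omega
        simp [List.getD_eq_getElem?_getD, hcomm, List.getElem?_eq_getElem hidx,
          List.getElem_drop]
    simp only [rowDiag, hsum, hsum2, pvAltRow, if_neg hin]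
    rw [zeroFold_eq]
    have hcast : PySem.List.slice row (some ((i : Int) + 1)) (some (n : Int))
        = (row.drop (i + 1)).take (n - (i + 1)) := by
      have : ((i : Int) + 1) = ((i + 1 : Nat) : Int) := by push_cast; ring
      rw [this, PySem.List.slice_natCast]
    rw [hcast]

-- ===== VERDICT (by name: the statement is the Claim_ definition above) =====
theorem update_diagonal_elems_spec : Claim_equal_update_diagonal_elems := by
  intro Q _ hpre
  unfold Spec_update_diagonal_elems update_diagonal_elems update_diagonal_elems_alt
  simp only []
  set n := Q.length with hn
  -- pass 1 rewritten to `set`-of-row form, then to mapIdx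
  have h1 : (List.range n).foldl (fun Q i =>
        (List.range n).foldl (fun Q j =>
          let Q := if i = n - 1 then pvSetE Q i j 0 else Q
          if j < i then pvSetE Q i j 0 else Q) Q) Q
      = Q.mapIdx (fun i r => if i < n then (List.range n).foldl (rowStep1 n i) r else r) := by
    have hb : (fun (Q : List (List Int)) (i : Nat) =>
          (List.range n).foldl (fun Q j =>
            let Q := if i = n - 1 then pvSetE Q i j 0 else Q
            if j < i then pvSetE Q i j 0 else Q) Q)
        = fun Q i => Q.set i ((List.range n).foldl (rowStep1 n i) (Q.getD i [])) := by
      funext Q i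
      have : (fun (Q : List (List Int)) (j : Nat) =>
            let Q := if i = n - 1 then pvSetE Q i j 0 else Q
            if j < i then pvSetE Q i j 0 else Q)
          = fun Q j => Q.set i (rowStep1 n i (Q.getD i []) j) := by
        funext Q j
        exact body1_eq n i Q j
      rw [this, foldl_set_row]
    rw [hb]
    exact foldl_range_set_mapIdx (fun i r => (List.range n).foldl (rowStep1 n i) r) n Q
  rw [h1]
  -- pass 2 rewritten to `set`-of-row form (using i < n inside the range), then to mapIdx
  have h2 : ∀ (R : List (List Int)), (List.range n).foldl (fun Q i =>
        (List.range n).foldl (fun Q j =>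
          if i = j then
            let s := ((List.range (n - (i + 1))).map (· + (i + 1))).foldl
              (fun s k => s + (Q.getD i []).getD k 0) 0
            pvSetE Q i i (-s)
          else Q) Q) R
      = R.mapIdx (fun i r => if i < n then rowDiag n i r else r) := by
    intro R
    have hcong : (List.range n).foldl (fun Q i =>
          (List.range n).foldl (fun Q j =>
            if i = j then
              let s := ((List.range (n - (i + 1))).map (· + (i + 1))).foldl
                (fun s k => s + (Q.getD i []).getD k 0) 0
              pvSetE Q i i (-s)
            else Q) Q) R
        = (List.range n).foldl (fun Q i => Q.set i (rowDiag n i (Q.getD i []))) R :=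
      PySem.List.foldl_congr_mem _ _ _ _ (by
        intro Q i hi
        simp only [List.mem_range] at hi
        rw [foldl_range_ite_eq n i hi
          (fun Q => pvSetE Q i i (-(((List.range (n - (i + 1))).map (· + (i + 1))).foldl
            (fun s k => s + (Q.getD i []).getD k 0) 0))) Q]
        rfl)
    rw [hcong]
    exact foldl_range_set_mapIdx (fun i r => rowDiag n i r) n R
  rw [h2, List.mapIdx_mapIdx]
  -- per-row equality under Pre_
  apply List.ext_getElem?
  intro k
  by_cases hk : k < Q.length
  · have hrow : n ≤ (Q[k]'hk).length := hpre _ (List.getElem_mem hk)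
    simp only [List.getElem?_mapIdx, List.getElem?_eq_getElem hk, Option.map_some,
      Function.comp_apply, if_pos (show k < n from hk)]
    rw [row_eq n k (Q[k]'hk) hk hrow]
  · simp [List.getElem?_mapIdx, List.getElem?_eq_none (by omega : Q.length ≤ k)]
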